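-- pv_equiv track=rewrite | github.com/Wuxb02/UrbanClimate-Expert | backend/app/services/neo4j_service.py | _extract_entity_type_from_json
-- ===== SOURCE A (Python) =====
-- from typing import Any
--
-- def _extract_entity_type_from_json(entity_data: dict[str, Any]) -> str:
--     """
--     从 LightRAG JSON 实体数据中提取实体类型
--
--     Args:
--         entity_data: 实体数据字典
--
--     Returns:
--         实体类型字符串（如果不存在返回 "unknown"）
--     """
--     # LightRAG JSON 格式中，实体类型可能在 entity_type 或 content 中
--     entity_type = entity_data.get("entity_type", "unknown")
--     if entity_type != "unknown":
--         return entity_type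
--
--     # 如果 entity_type 不存在，尝试从 content 解析
--     # LightRAG 格式: "entity_name: xxx\nentity_type: location\n..."
--     content = entity_data.get("content", "")
--     for line in content.split("\n"):
--         if line.strip().startswith("entity_type:"):
--             entity_type = line.split(":", 1)[1].strip()
--             break
--
--     return entity_type if entity_type else "unknown"
-- ===== SOURCE B (Python) =====
-- _TAG = "entity_type:"
--
--
-- def _extract_entity_type_from_json(entity_data):
--     entity_type = entity_data.get("entity_type", "unknown")
--     if entity_type != "unknown":
--         return entity_type
--
--     # Jump between occurrences of the tag in the raw content instead of
--     # splitting it into lines: an occurrence counts when only whitespace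
--     # sits between it and the start of its line.
--     content = entity_data.get("content", "")
--     pos = content.find(_TAG)
--     while pos != -1:
--         start = content.rfind("\n", 0, pos) + 1
--         if content[start:pos].strip() == "":
--             end = content.find("\n", pos)
--             if end == -1:
--                 end = len(content)
--             value = content[pos + len(_TAG):end].strip()
--             return value if value else "unknown"
--         pos = content.find(_TAG, pos + 1)
--     return "unknown"
-- ===== Notes on version B (the rewrite author's own statement) =====
-- stated objective: alternative
-- what changed: Instead of splitting the content into lines and linearly testing each one, B jumps between the occurrences of the literal 'entity_type:' via str.find, validates an occurrence by checking that only whitespace lies between it and its line start (str.rfind), and slices the value up to the next newline.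
import Mathlib
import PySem

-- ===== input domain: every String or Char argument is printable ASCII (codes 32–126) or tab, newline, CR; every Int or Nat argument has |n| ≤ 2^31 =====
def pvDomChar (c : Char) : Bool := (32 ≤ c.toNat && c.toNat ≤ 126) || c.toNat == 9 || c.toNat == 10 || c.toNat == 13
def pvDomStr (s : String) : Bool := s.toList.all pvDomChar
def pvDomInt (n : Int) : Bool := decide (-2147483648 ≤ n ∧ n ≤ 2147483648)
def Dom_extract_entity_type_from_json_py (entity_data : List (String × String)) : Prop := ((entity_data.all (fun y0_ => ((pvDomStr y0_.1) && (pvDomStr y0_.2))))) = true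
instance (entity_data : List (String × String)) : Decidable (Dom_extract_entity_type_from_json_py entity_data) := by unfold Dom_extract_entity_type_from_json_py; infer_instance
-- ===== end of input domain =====

-- B replaces A's line-splitting first-match scan by find/rfind jumps between tag
-- occurrences in the raw content (objective: alternative; return value only, no mutation).

-- ===== PORT A =====
-- the for-loop over content.split("\n") with break: value of the first matching line,
-- or the incoming "unknown" when the loop exhausts
def pvALoop : List String → String
  | [] => "unknown"
  | line :: rest =>
    if PySem.Str.startswith (PySem.Str.strip line) "entity_type:" then
      -- line.split(":", 1)[1].strip() — the guard guarantees a ':' in line, so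
      -- index 1 is in range and pyGetD is exact here
      PySem.Str.strip (PySem.List.pyGetD ((PySem.Str.splitMax? line ":" 1).getD []) 1 "")
    else pvALoop rest

def extract_entity_type_from_json_py (entity_data : List (String × String)) : String :=
  let entity_type := PySem.Dict.getD (PySem.Dict.ofList entity_data) "entity_type" "unknown"
  if entity_type ≠ "unknown" then entity_type
  else
    let content := PySem.Dict.getD (PySem.Dict.ofList entity_data) "content" ""
    let entity_type := pvALoop ((PySem.Str.split? content "\n").getD [])
    if entity_type = "" then "unknown" else entity_type

-- ===== PORT B =====
def pvTag : List Char := "entity_type:".toList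

-- exact port of B's while loop: content.find jumps through the occurrences of _TAG in
-- increasing position order, so the loop is the first occurrence position passing the
-- line-start test.  content[content.rfind("\n",0,pos)+1 : pos] — the chars strictly
-- between the previous '\n' and pos — is ported as
-- (content.take pos).reverse.takeWhile (· ≠ '\n'); its .strip() == "" test is
-- unaffected by the reversal.
def pvBFind (content : List Char) : Option Nat :=
  (List.range content.length).find? fun p =>
    PySem.Chars.startswith (content.drop p) pvTag &&
    PySem.Chars.strip ((content.take p).reverse.takeWhile (fun c => !(c == '\n'))) == []

-- content[pos+len(_TAG):end] with end = content.find("\n", pos) (end = len(content) if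
-- absent): the tag contains no '\n', so this is everything after the tag up to the
-- next newline — exact
def pvBValue (content : List Char) (p : Nat) : List Char :=
  (content.drop (p + pvTag.length)).takeWhile (fun c => !(c == '\n'))

def extract_entity_type_from_json_py_alt (entity_data : List (String × String)) : String :=
  let entity_type := PySem.Dict.getD (PySem.Dict.ofList entity_data) "entity_type" "unknown"
  if entity_type ≠ "unknown" then entity_type
  else
    let content := (PySem.Dict.getD (PySem.Dict.ofList entity_data) "content" "").toList
    match pvBFind content with
    | some p =>
      let value := String.ofList (PySem.Chars.strip (pvBValue content p))
      if value = "" then "unknown" else value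
    | none => "unknown"

-- ===== PRECONDITION & SPEC =====
def Spec_extract_entity_type_from_json_py (entity_data : List (String × String)) (out : String) : Prop := out = extract_entity_type_from_json_py_alt entity_data
instance (entity_data : List (String × String)) (out : String) : Decidable (Spec_extract_entity_type_from_json_py entity_data out) := by unfold Spec_extract_entity_type_from_json_py; infer_instance

-- ===== CLAIM (what is proved, stated in full; the proofs are below) =====
def Claim_equal_extract_entity_type_from_json_py : Prop := ∀ (entity_data : List (String × String)), Dom_extract_entity_type_from_json_py entity_data → Spec_extract_entity_type_from_json_py entity_data (extract_entity_type_from_json_py entity_data)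

-- ===== LEMMAS AND PROOFS =====

-- a line matches A's test iff the tag is a prefix of the line with its leading
-- whitespace removed
def pvLineMatch (l : List Char) : Bool := pvTag.isPrefixOf (l.dropWhile PySem.Chars.isspace)

theorem pv_goMax_m0 (fuel : Nat) (l : List Char) (acc : List (List Char)) :
    PySem.Chars.splitOnMax.go [':'] fuel 0 l [] acc = acc.reverse ++ [l] := by
  match fuel, l with
  | 0, l => simp [PySem.Chars.splitOnMax.go]
  | fuel+1, [] => simp [PySem.Chars.splitOnMax.go]
  | fuel+1, c :: r => simp [PySem.Chars.splitOnMax.go]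

theorem pv_goMax_1 (w : List Char) (hw : ∀ c ∈ w, c ≠ ':') :
    ∀ (fuel : Nat), w.length < fuel → ∀ (cur : List Char) (acc : List (List Char)) (v : List Char),
    PySem.Chars.splitOnMax.go [':'] fuel 1 (w ++ ':' :: v) cur acc
      = acc.reverse ++ [cur.reverse ++ w, v] := by
  induction w with
  | nil =>
    intro fuel hf cur acc v
    match fuel, hf with
    | fuel+1, _ =>
      simp [PySem.Chars.splitOnMax.go, List.isPrefixOf, pv_goMax_m0]
  | cons c w ih =>
    intro fuel hf cur acc v
    match fuel, hf with
    | fuel+1, hf =>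
      have hc : c ≠ ':' := hw c (by simp)
      simp only [List.cons_append, PySem.Chars.splitOnMax.go, List.isPrefixOf, List.cons_ne_nil]
      rw [if_neg (by simp), if_neg (by simp [hc, Ne.symm hc, List.isPrefixOf])]
      rw [ih (fun x hx => hw x (by simp [hx])) fuel (by simpa using hf)]
      simp

theorem pv_splitOnMax_colon (w v : List Char) (hw : ∀ c ∈ w, c ≠ ':') :
    PySem.Chars.splitOnMax (w ++ ':' :: v) [':'] 1 = [w, v] := by
  rw [PySem.Chars.splitOnMax, if_neg (by norm_num)]
  have h1 : Int.toNat 1 = 1 := rfl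
  rw [h1, pv_goMax_1 w hw _ (by simp)]
  simp

theorem pv_go_acc (fuel : Nat) : ∀ (l cur : List Char) (acc : List (List Char)),
    PySem.Chars.splitOn.go ['\n'] fuel l cur acc
      = acc.reverse ++ PySem.Chars.splitOn.go ['\n'] fuel l cur [] := by
  induction fuel with
  | zero => intro l cur acc; simp [PySem.Chars.splitOn.go]
  | succ fuel ih =>
    intro l cur acc
    match l with
    | [] => simp [PySem.Chars.splitOn.go]
    | c :: r =>
      simp only [PySem.Chars.splitOn.go]
      split
      · rw [ih _ _ (cur.reverse :: acc), ih _ _ (cur.reverse :: [])]; simp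
      · rw [ih _ _ acc]

theorem pv_go_no (l : List Char) (hl : '\n' ∉ l) : ∀ (fuel : Nat), l.length < fuel →
    ∀ (cur : List Char) (acc : List (List Char)),
    PySem.Chars.splitOn.go ['\n'] fuel l cur acc = acc.reverse ++ [cur.reverse ++ l] := by
  induction l with
  | nil =>
    intro fuel hf cur acc
    match fuel, hf with
    | fuel+1, _ => simp [PySem.Chars.splitOn.go]
  | cons c r ih =>
    intro fuel hf cur acc
    match fuel, hf with
    | fuel+1, hf =>
      have hc : c ≠ '\n' := by rintro rfl; exact hl (by simp)
      simp only [PySem.Chars.splitOn.go]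
      rw [if_neg (by simp [List.isPrefixOf, Ne.symm hc])]
      rw [ih (fun h => hl (by simp [h])) fuel (by simpa using hf)]
      simp

theorem pv_go_cons (l : List Char) (hl : '\n' ∉ l) : ∀ (rest cur : List Char) (fuel : Nat) (acc : List (List Char)),
    PySem.Chars.splitOn.go ['\n'] (l.length + 1 + fuel) (l ++ '\n' :: rest) cur acc
      = PySem.Chars.splitOn.go ['\n'] fuel rest [] ((cur.reverse ++ l) :: acc) := by
  induction l with
  | nil =>
    intro rest cur fuel acc
    have : ([] : List Char).length + 1 + fuel = fuel + 1 := by simp; omega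
    rw [this]
    simp [PySem.Chars.splitOn.go, List.isPrefixOf]
  | cons c r ih =>
    intro rest cur fuel acc
    have hc : c ≠ '\n' := by rintro rfl; exact hl (by simp)
    have : (c :: r).length + 1 + fuel = (r.length + 1 + fuel) + 1 := by simp; omega
    rw [this]
    simp only [List.cons_append, PySem.Chars.splitOn.go]
    rw [if_neg (by simp [List.isPrefixOf, Ne.symm hc])]
    rw [ih (fun h => hl (by simp [h])) rest]
    simp

theorem pv_splitOn_single (l : List Char) (hl : '\n' ∉ l) :
    PySem.Chars.splitOn l ['\n'] = [l] := by
  rw [PySem.Chars.splitOn, pv_go_no l hl _ (by omega)]; simp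

theorem pv_splitOn_cons (l rest : List Char) (hl : '\n' ∉ l) :
    PySem.Chars.splitOn (l ++ '\n' :: rest) ['\n'] = l :: PySem.Chars.splitOn rest ['\n'] := by
  rw [PySem.Chars.splitOn]
  have : (l ++ '\n' :: rest).length + 1 = l.length + 1 + (rest.length + 1) := by simp; omega
  rw [this, pv_go_cons l hl, pv_go_acc]
  simp [PySem.Chars.splitOn]

theorem pv_rstrip_nil_iff (l : List Char) :
    PySem.Chars.rstrip l = [] ↔ ∀ c ∈ l, PySem.Chars.isspace c = true := by
  simp [PySem.Chars.rstrip, List.dropWhile_eq_nil_iff]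

theorem pv_strip_nil_iff (l : List Char) :
    PySem.Chars.strip l = [] ↔ ∀ c ∈ l, PySem.Chars.isspace c = true := by
  rw [PySem.Chars.strip, pv_rstrip_nil_iff]
  constructor
  · intro h c hc
    by_cases hs : PySem.Chars.isspace c = true
    · exact hs
    · have hc' : c ∈ List.takeWhile PySem.Chars.isspace l ++ List.dropWhile PySem.Chars.isspace l := by
        rw [List.takeWhile_append_dropWhile]; exact hc
      rcases List.mem_append.1 hc' with h1 | h2
      · exact List.mem_takeWhile_imp h1
      · exact h _ h2
  · intro h c hc
    exact h c (List.dropWhile_sublist _ |>.mem hc)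

theorem pv_tag_prefix_rstrip (x : List Char) :
    pvTag <+: PySem.Chars.rstrip x ↔ pvTag <+: x := by
  constructor
  · intro h
    refine h.trans ?_
    rw [PySem.Chars.rstrip]
    have := List.dropWhile_suffix (p := PySem.Chars.isspace) (l := x.reverse)
    have := List.reverse_prefix.mpr this
    simpa using this
  · rintro ⟨r, rfl⟩
    rw [PySem.Chars.rstrip, List.reverse_append, List.dropWhile_append]
    split
    · have : List.dropWhile PySem.Chars.isspace pvTag.reverse = pvTag.reverse := by decide
      rw [this]; simp
    · rw [List.reverse_append]
      exact ⟨_, rfl⟩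

theorem pv_match_iff (l : List Char) :
    PySem.Chars.startswith (PySem.Chars.strip l) pvTag = pvLineMatch l := by
  rw [Bool.eq_iff_iff, PySem.Chars.startswith_iff, pvLineMatch, PySem.Chars.strip,
    PySem.Chars.lstrip, List.isPrefixOf_iff_prefix]
  exact pv_tag_prefix_rstrip _

theorem pv_line_decomp (l : List Char) (hm : pvLineMatch l = true) :
    l = (List.takeWhile PySem.Chars.isspace l ++ "entity_type".toList)
          ++ ':' :: (l.dropWhile PySem.Chars.isspace).drop pvTag.length := by
  rw [pvLineMatch, List.isPrefixOf_iff_prefix] at hm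
  obtain ⟨v, hv⟩ := hm
  have hv2 : (l.dropWhile PySem.Chars.isspace).drop pvTag.length = v := by
    rw [← hv]; simp
  conv_lhs => rw [← List.takeWhile_append_dropWhile (p := PySem.Chars.isspace) (l := l), ← hv]
  rw [hv2]
  have : pvTag = "entity_type".toList ++ [':'] := by decide
  rw [this]; simp

theorem pv_aline (l : List Char) (hm : pvLineMatch l = true) :
    PySem.Str.strip (PySem.List.pyGetD ((PySem.Str.splitMax? (String.ofList l) ":" 1).getD []) 1 "")
      = String.ofList (PySem.Chars.strip ((l.dropWhile PySem.Chars.isspace).drop pvTag.length)) := by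
  have hsplit : PySem.Chars.splitOnMax l [':'] 1
      = [List.takeWhile PySem.Chars.isspace l ++ "entity_type".toList,
         (l.dropWhile PySem.Chars.isspace).drop pvTag.length] := by
    conv_lhs => rw [pv_line_decomp l hm]
    apply pv_splitOnMax_colon
    intro c hc
    rcases List.mem_append.1 hc with h1 | h2
    · have := List.mem_takeWhile_imp h1
      rintro rfl; revert this; decide
    · intro hceq; subst hceq; revert h2; decide
  rw [PySem.Str.splitMax?, String.toList_ofList,
    show (":".toList) = [':'] from by decide,
    PySem.Chars.splitMax?]
  rw [if_neg (by decide), hsplit]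
  simp [PySem.List.pyGetD_ofNat']
  rw [show PySem.Str.strip (String.ofList ((l.dropWhile PySem.Chars.isspace).drop pvTag.length))
      = String.ofList (PySem.Chars.strip (String.ofList ((l.dropWhile PySem.Chars.isspace).drop pvTag.length)).toList) from rfl]
  rw [String.toList_ofList]

theorem pv_getElem_takeWhile_len (P : Char → Bool) (l : List Char) :
    l[(l.takeWhile P).length]? = (l.dropWhile P)[0]? := by
  induction l with
  | nil => simp
  | cons c r ih => by_cases h : P c <;> simp [List.takeWhile_cons, List.dropWhile_cons, h, ih]

theorem pv_space_take_iff (l : List Char) (p : Nat) (hp : p ≤ l.length) :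
    (∀ c ∈ l.take p, PySem.Chars.isspace c = true)
      ↔ p ≤ (l.takeWhile PySem.Chars.isspace).length := by
  constructor
  · intro h
    by_contra hk
    push_neg at hk
    have hd : l.dropWhile PySem.Chars.isspace ≠ [] := by
      intro he
      have hlen := congrArg List.length (List.takeWhile_append_dropWhile (p := PySem.Chars.isspace) (l := l))
      rw [he] at hlen
      simp at hlen
      omega
    have hhead : PySem.Chars.isspace ((l.dropWhile PySem.Chars.isspace).head hd) = false :=
      List.head_dropWhile_not _ hd
    have hmem : (l.dropWhile PySem.Chars.isspace).head hd ∈ l.take p := by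
      apply List.mem_of_getElem? (i := (l.takeWhile PySem.Chars.isspace).length)
      rw [List.getElem?_take_of_lt hk, pv_getElem_takeWhile_len]
      rw [← List.head?_eq_getElem?]
      exact List.head?_eq_some_head hd
    have := h _ hmem
    rw [hhead] at this; cases this
  · intro hk c hc
    have ht : l.take p = (l.takeWhile PySem.Chars.isspace).take p := by
      conv_lhs => rw [← List.takeWhile_append_dropWhile (p := PySem.Chars.isspace) (l := l)]
      exact List.take_append_of_le_length hk
    rw [ht] at hc
    exact List.mem_takeWhile_imp ((List.take_prefix _ _).subset hc)

theorem pv_dropWhile_eq_drop (P : Char → Bool) (l : List Char) :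
    l.dropWhile P = l.drop (l.takeWhile P).length := by
  induction l with
  | nil => simp
  | cons c r ih => by_cases h : P c <;> simp [h, ih]

theorem pv_take_takeWhile_space (l : List Char) :
    l.take (l.takeWhile PySem.Chars.isspace).length = l.takeWhile PySem.Chars.isspace :=
  (List.prefix_iff_eq_take.1 (List.takeWhile_prefix _)).symm

theorem pv_valid_line (l t : List Char) (hl : '\n' ∉ l) (ht : t = [] ∨ ∃ r, t = '\n' :: r)
    (p : Nat) (hp : p ≤ l.length) :
    (PySem.Chars.startswith ((l ++ t).drop p) pvTag &&
      PySem.Chars.strip (((l ++ t).take p).reverse.takeWhile (fun c => !(c == '\n'))) == []) = true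
      ↔ (pvLineMatch l = true ∧ p = (l.takeWhile PySem.Chars.isspace).length) := by
  rw [Bool.and_eq_true, beq_iff_eq, List.take_append_of_le_length hp,
    List.drop_append_of_le_length hp, PySem.Chars.startswith_iff]
  have hseg : (l.take p).reverse.takeWhile (fun c => !(c == '\n')) = (l.take p).reverse := by
    rw [List.takeWhile_eq_self_iff]
    intro x hx
    have : x ∈ l := (List.take_prefix _ _).subset (List.mem_reverse.1 hx)
    simp
    rintro rfl; exact hl this
  rw [hseg, pv_strip_nil_iff]
  simp only [List.mem_reverse]
  constructor
  · rintro ⟨hpre, hsp⟩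
    have hk : p ≤ (l.takeWhile PySem.Chars.isspace).length := (pv_space_take_iff l p hp).1 hsp
    have hkl : (l.takeWhile PySem.Chars.isspace).length ≤ l.length :=
      (List.takeWhile_prefix _).length_le
    by_cases hlt : p < (l.takeWhile PySem.Chars.isspace).length
    · exfalso
      obtain ⟨r, hr⟩ := hpre
      have h0 : (l.drop p ++ t)[0]? = some 'e' := by
        rw [← hr]
        have : pvTag = 'e' :: pvTag.tail := by decide
        rw [this]; simp
      rw [List.getElem?_append_left (by simp; omega), List.getElem?_drop] at h0
      have hw : (l.takeWhile PySem.Chars.isspace)[p]? = some 'e' := by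
        have h1 : (l.take (l.takeWhile PySem.Chars.isspace).length)[p]? = l[p]? :=
          List.getElem?_take_of_lt hlt
        rw [pv_take_takeWhile_space] at h1
        rw [h1]; simpa using h0
      have := List.mem_takeWhile_imp (List.mem_of_getElem? hw)
      revert this; decide
    · have hpk : p = (l.takeWhile PySem.Chars.isspace).length := by omega
      subst hpk
      refine ⟨?_, rfl⟩
      rw [← pv_dropWhile_eq_drop] at hpre
      rw [pvLineMatch, List.isPrefixOf_iff_prefix]
      by_cases hlen : pvTag.length ≤ (l.dropWhile PySem.Chars.isspace).length
      · rw [List.prefix_iff_eq_take] at hpre ⊢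
        rwa [List.take_append_of_le_length hlen] at hpre
      · exfalso
        rcases ht with rfl | ⟨r, rfl⟩
        · rw [List.append_nil] at hpre
          have := hpre.length_le; omega
        · rw [List.prefix_iff_eq_take, List.take_append] at hpre
          have hnl : '\n' ∈ pvTag := by
            rw [hpre]
            refine List.mem_append.2 (Or.inr ?_)
            have : pvTag.length - (l.dropWhile PySem.Chars.isspace).length
                = (pvTag.length - (l.dropWhile PySem.Chars.isspace).length - 1) + 1 := by omega
            rw [this]; simp
          revert hnl; decide
  · rintro ⟨hm, rfl⟩
    constructor
    · rw [pvLineMatch, List.isPrefixOf_iff_prefix] at hm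
      rw [← pv_dropWhile_eq_drop]
      exact hm.trans (List.prefix_append _ _)
    · intro c hc
      rw [pv_take_takeWhile_space] at hc
      exact List.mem_takeWhile_imp hc

theorem pv_find?_range_unique (n k : Nat) (f : Nat → Bool) (hk : k < n)
    (hf : ∀ p < n, (f p = true ↔ p = k)) : (List.range n).find? f = some k := by
  rw [List.find?_eq_some_iff_append]
  refine ⟨(hf k hk).2 rfl, List.range k, (List.range (n - k - 1)).map (k + 1 + ·), ?_, ?_⟩
  · have h1 : n = k + (1 + (n - k - 1)) := by omega
    rw [h1, List.range_add, List.range_add]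
    simp [List.range_one]
  · intro a ha
    have halt : a < k := List.mem_range.1 ha
    simp only [Bool.not_eq_eq_eq_not, Bool.not_true]
    by_contra hfa
    have : f a = true := by revert hfa; cases f a <;> simp
    have := (hf a (by omega)).1 this
    omega

theorem pv_mismatch_tag_len (l : List Char) (hm : pvLineMatch l = true) :
    (l.takeWhile PySem.Chars.isspace).length + pvTag.length ≤ l.length := by
  rw [pvLineMatch, List.isPrefixOf_iff_prefix] at hm
  have h1 := hm.length_le
  have h2 := congrArg List.length (List.takeWhile_append_dropWhile (p := PySem.Chars.isspace) (l := l))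
  simp only [List.length_append] at h2
  omega

theorem pv_bfind_single (l : List Char) (hl : '\n' ∉ l) :
    pvBFind l = if pvLineMatch l then some (l.takeWhile PySem.Chars.isspace).length else none := by
  rw [pvBFind]
  split
  · rename_i hm
    apply pv_find?_range_unique
    · have := pv_mismatch_tag_len l hm
      have : pvTag.length = 12 := by decide
      omega
    · intro p hp
      have hv := pv_valid_line l [] hl (Or.inl rfl) p (by simpa using Nat.le_of_lt hp)
      rw [List.append_nil] at hv
      rw [hv]
      simp [hm]
  · rename_i hm
    rw [List.find?_eq_none]
    intro p hp
    rw [List.mem_range] at hp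
    have hv := pv_valid_line l [] hl (Or.inl rfl) p (by simpa using Nat.le_of_lt hp)
    rw [List.append_nil] at hv
    rw [hv]
    simp [hm]

theorem pv_valid_shift (l rest : List Char) (q : Nat) :
    (PySem.Chars.startswith ((l ++ '\n' :: rest).drop (l.length + 1 + q)) pvTag &&
      PySem.Chars.strip (((l ++ '\n' :: rest).take (l.length + 1 + q)).reverse.takeWhile (fun c => !(c == '\n'))) == [])
    = (PySem.Chars.startswith (rest.drop q) pvTag &&
      PySem.Chars.strip ((rest.take q).reverse.takeWhile (fun c => !(c == '\n'))) == []) := by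
  have hface : l ++ '\n' :: rest = (l ++ ['\n']) ++ rest := by simp
  rw [hface]
  have hlen : (l ++ ['\n']).length = l.length + 1 := by simp
  have hdrop : ((l ++ ['\n']) ++ rest).drop (l.length + 1 + q) = rest.drop q := by
    rw [List.drop_append, hlen]
    have h1 : l.length + 1 + q - (l.length + 1) = q := by omega
    rw [h1, List.drop_of_length_le (by omega)]
    simp
  have htake : ((l ++ ['\n']) ++ rest).take (l.length + 1 + q) = (l ++ ['\n']) ++ rest.take q := by
    rw [List.take_append, hlen, List.take_of_length_le (by omega)]
    congr 2
    omega
  rw [hdrop, htake]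
  congr 2
  rw [List.reverse_append]
  have h2 : (l ++ ['\n']).reverse = '\n' :: l.reverse := by simp
  rw [h2, List.takeWhile_append]
  split
  · rename_i h
    rw [(List.takeWhile_prefix _).eq_of_length h]
    simp
  · rfl

theorem pv_bvalue_shift (l rest : List Char) (q : Nat) :
    pvBValue (l ++ '\n' :: rest) (l.length + 1 + q) = pvBValue rest q := by
  rw [pvBValue, pvBValue]
  congr 1
  have hface : l ++ '\n' :: rest = (l ++ ['\n']) ++ rest := by simp
  have hlen : (l ++ ['\n']).length = l.length + 1 := by simp
  rw [hface, List.drop_append, hlen]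
  have h1 : l.length + 1 + q + pvTag.length - (l.length + 1) = q + pvTag.length := by omega
  rw [h1, List.drop_of_length_le (by omega)]
  simp

theorem pv_bvalue_line (l t : List Char) (hl : '\n' ∉ l) (ht : t = [] ∨ ∃ r, t = '\n' :: r)
    (hm : pvLineMatch l = true) :
    pvBValue (l ++ t) (l.takeWhile PySem.Chars.isspace).length
      = (l.dropWhile PySem.Chars.isspace).drop pvTag.length := by
  have hle := pv_mismatch_tag_len l hm
  rw [pvBValue, List.drop_append_of_le_length hle]
  have hdd : l.drop ((l.takeWhile PySem.Chars.isspace).length + pvTag.length)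
      = (l.dropWhile PySem.Chars.isspace).drop pvTag.length := by
    rw [pv_dropWhile_eq_drop, List.drop_drop]
  rw [hdd]
  rw [List.takeWhile_append]
  have hvnl : ∀ c ∈ (l.dropWhile PySem.Chars.isspace).drop pvTag.length, (!(c == '\n')) = true := by
    intro c hc
    have : c ∈ l := (List.dropWhile_sublist _).mem ((List.drop_sublist _ _).mem hc)
    simp; rintro rfl; exact hl this
  have hfull : List.takeWhile (fun c => !(c == '\n')) ((l.dropWhile PySem.Chars.isspace).drop pvTag.length)
      = (l.dropWhile PySem.Chars.isspace).drop pvTag.length :=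
    List.takeWhile_eq_self_iff.2 hvnl
  split
  · rcases ht with rfl | ⟨r, rfl⟩ <;> simp
  · rename_i h
    rw [hfull] at h
    exact absurd rfl h

theorem pv_bfind_cons (l rest : List Char) (hl : '\n' ∉ l) :
    pvBFind (l ++ '\n' :: rest)
      = if pvLineMatch l then some (l.takeWhile PySem.Chars.isspace).length
        else (pvBFind rest).map (l.length + 1 + ·) := by
  rw [pvBFind]
  have hlen : (l ++ '\n' :: rest).length = (l.length + 1) + rest.length := by simp; omega
  rw [hlen, List.range_add, List.find?_append]
  split
  · rename_i hm
    have hfirst : (List.range (l.length + 1)).find? (fun p =>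
        PySem.Chars.startswith ((l ++ '\n' :: rest).drop p) pvTag &&
        PySem.Chars.strip (((l ++ '\n' :: rest).take p).reverse.takeWhile (fun c => !(c == '\n'))) == [])
        = some (l.takeWhile PySem.Chars.isspace).length := by
      apply pv_find?_range_unique
      · have h1 := pv_mismatch_tag_len l hm
        have h2 : 0 < pvTag.length := by decide
        omega
      · intro p hp
        rw [pv_valid_line l ('\n' :: rest) hl (Or.inr ⟨rest, rfl⟩) p (by omega)]
        simp [hm]
    rw [hfirst]
    rfl
  · rename_i hm
    have hfirst : (List.range (l.length + 1)).find? (fun p =>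
        PySem.Chars.startswith ((l ++ '\n' :: rest).drop p) pvTag &&
        PySem.Chars.strip (((l ++ '\n' :: rest).take p).reverse.takeWhile (fun c => !(c == '\n'))) == [])
        = none := by
      rw [List.find?_eq_none]
      intro p hp
      rw [List.mem_range] at hp
      rw [pv_valid_line l ('\n' :: rest) hl (Or.inr ⟨rest, rfl⟩) p (by omega)]
      simp [hm]
    rw [hfirst, Option.none_or, List.find?_map, pvBFind]
    have hfun : ((fun p => PySem.Chars.startswith ((l ++ '\n' :: rest).drop p) pvTag &&
          PySem.Chars.strip (((l ++ '\n' :: rest).take p).reverse.takeWhile (fun c => !(c == '\n'))) == [])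
        ∘ (fun x => l.length + 1 + x))
        = (fun q => PySem.Chars.startswith (rest.drop q) pvTag &&
          PySem.Chars.strip ((rest.take q).reverse.takeWhile (fun c => !(c == '\n'))) == []) := by
      funext q
      exact pv_valid_shift l rest q
    rw [hfun]

theorem pv_split_at_nl : ∀ (cs : List Char), '\n' ∈ cs → ∃ l rest, cs = l ++ '\n' :: rest ∧ '\n' ∉ l := by
  intro cs h
  induction cs with
  | nil => cases h
  | cons c r ih =>
    by_cases hc : c = '\n'
    · exact ⟨[], r, by rw [hc]; rfl, by simp⟩
    · have hr : '\n' ∈ r := by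
        rcases List.mem_cons.1 h with h1 | h2
        · exact absurd h1.symm hc
        · exact h2
      obtain ⟨l, rest, hrw, hnl⟩ := ih hr
      exact ⟨c :: l, rest, by rw [List.cons_append, ← hrw], by
        simp only [List.mem_cons, not_or]
        exact ⟨fun he => hc he.symm, hnl⟩⟩

theorem pv_aloop_cons (l : List Char) (ls : List String) :
    pvALoop (String.ofList l :: ls)
      = if pvLineMatch l
        then String.ofList (PySem.Chars.strip ((l.dropWhile PySem.Chars.isspace).drop pvTag.length))
        else pvALoop ls := by
  simp only [pvALoop]
  have hc : PySem.Str.startswith (PySem.Str.strip (String.ofList l)) "entity_type:" = pvLineMatch l := by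
    have h1 : PySem.Str.startswith (PySem.Str.strip (String.ofList l)) "entity_type:"
        = PySem.Chars.startswith (PySem.Str.strip (String.ofList l)).toList ("entity_type:".toList) := rfl
    rw [h1, PySem.Str.toList_strip, String.toList_ofList]
    have ht : "entity_type:".toList = pvTag := rfl
    rw [ht, pv_match_iff]
  rw [hc]
  split
  · rename_i hm
    exact pv_aline l hm
  · rfl

theorem pv_main (cs : List Char) :
    pvALoop ((PySem.Chars.splitOn cs ['\n']).map String.ofList)
      = match pvBFind cs with
        | some p => String.ofList (PySem.Chars.strip (pvBValue cs p))
        | none => "unknown" := by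
  suffices H : ∀ (n : Nat) (cs : List Char), cs.length ≤ n →
      pvALoop ((PySem.Chars.splitOn cs ['\n']).map String.ofList)
        = match pvBFind cs with
          | some p => String.ofList (PySem.Chars.strip (pvBValue cs p))
          | none => "unknown" from H cs.length cs le_rfl
  intro n
  induction n using Nat.strong_induction_on with
  | _ n ih =>
    intro cs hcs
    by_cases h : '\n' ∈ cs
    · obtain ⟨l, rest, rfl, hl⟩ := pv_split_at_nl cs h
      rw [pv_splitOn_cons l rest hl, List.map_cons, pv_aloop_cons, pv_bfind_cons l rest hl]
      split
      · rename_i hm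
        show _ = String.ofList (PySem.Chars.strip
          (pvBValue (l ++ '\n' :: rest) (List.takeWhile PySem.Chars.isspace l).length))
        rw [pv_bvalue_line l ('\n' :: rest) hl (Or.inr ⟨rest, rfl⟩) hm]
      · rename_i hm
        have hlen : rest.length < n := by
          simp only [List.length_append, List.length_cons] at hcs
          omega
        rw [ih rest.length hlen rest le_rfl]
        cases hfind : pvBFind rest with
        | none => simp [hfind]
        | some q => simp [hfind, pv_bvalue_shift]
    · rw [pv_splitOn_single cs h, List.map_cons, List.map_nil, pv_aloop_cons,
        pv_bfind_single cs h]
      split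
      · rename_i hm
        have hv := pv_bvalue_line cs [] h (Or.inl rfl) hm
        rw [List.append_nil] at hv
        show _ = String.ofList (PySem.Chars.strip
          (pvBValue cs (List.takeWhile PySem.Chars.isspace cs).length))
        rw [hv]
      · rfl

theorem pv_split_getD (content : String) :
    (PySem.Str.split? content "\n").getD []
      = (PySem.Chars.splitOn content.toList ['\n']).map String.ofList := by
  rw [PySem.Str.split?, PySem.Chars.split?]
  have h1 : "\n".toList = ['\n'] := rfl
  rw [h1]
  simp

theorem pv_final (entity_data : List (String × String)) :
    extract_entity_type_from_json_py entity_data = extract_entity_type_from_json_py_alt entity_data := by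
  rw [extract_entity_type_from_json_py, extract_entity_type_from_json_py_alt]
  by_cases h : PySem.Dict.getD (PySem.Dict.ofList entity_data) "entity_type" "unknown" ≠ "unknown"
  · rw [if_pos h, if_pos h]
  · rw [if_neg h, if_neg h]
    simp only [pv_split_getD, pv_main]
    cases hf : pvBFind (PySem.Dict.getD (PySem.Dict.ofList entity_data) "content" "").toList with
    | none => simp [hf]
    | some p => simp [hf]

-- ===== VERDICT (by name: the statement is the Claim_ definition above) =====
theorem extract_entity_type_from_json_py_spec : Claim_equal_extract_entity_type_from_json_py := by
  intro entity_data _hdom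
  unfold Spec_extract_entity_type_from_json_py
  exact pv_final entity_data
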